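-- pv_equiv track=rewrite | github.com/Gistbatch/tree-tensor-network-simulator | circuits/sycamore.py | _create_pattern
-- ===== SOURCE A (Python) =====
-- from typing import List, Tuple
--
-- def _create_pattern(rows: int) -> List[List[int]]:
--     a_gates, b_gates, c_gates, d_gates = [], [], [], []
--     for row in range(0, rows):
--         if row < rows - 1:
--             a_gates += [
--                 [x, x + rows]
--                 for x in range(
--                     rows * row if row % 2 == 0 else rows * row + 1,
--                     (row + 1) * rows,
--                     2,
--                 )
--             ]
--             b_gates += [
--                 [x, x + rows]
--                 for x in range(
--                     rows * row if row % 2 == 1 else rows * row + 1,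
--                     (row + 1) * rows,
--                     2,
--                 )
--             ]
--         c_gates += [
--             [x, x + 1]
--             for x in range(
--                 rows * row if row % 2 == 0 else rows * row + 1,
--                 (row + 1) * rows - 1,
--                 2,
--             )
--         ]
--         d_gates += [
--             [x, x + 1]
--             for x in range(
--                 rows * row if row % 2 == 1 else rows * row + 1,
--                 (row + 1) * rows - 1,
--                 2,
--             )
--         ]
--     return [a_gates, b_gates, c_gates, d_gates, c_gates, d_gates, a_gates, b_gates]
-- ===== SOURCE B (Python) =====
-- from typing import List
--
-- def _create_pattern(rows: int) -> List[List[int]]: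
--     a_gates, b_gates, c_gates, d_gates = [], [], [], []
--     for r in range(rows):
--         for c in range(rows):
--             x = r * rows + c
--             even = (r + c) % 2 == 0
--             if r < rows - 1:
--                 (a_gates if even else b_gates).append([x, x + rows])
--             if c < rows - 1:
--                 (c_gates if even else d_gates).append([x, x + 1])
--     return [a_gates, b_gates, c_gates, d_gates, c_gates, d_gates, a_gates, b_gates]
-- ===== Notes on version B (the rewrite author's own statement) =====
-- stated objective: simpler
-- what changed: A builds each gate list from four per-row step-2 range comprehensions whose start offset depends on the row's parity; B walks the grid once per (row, column) pair and routes each vertical/horizontal edge to the right list by a single (r + c) % 2 checkerboard test.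
import Mathlib
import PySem

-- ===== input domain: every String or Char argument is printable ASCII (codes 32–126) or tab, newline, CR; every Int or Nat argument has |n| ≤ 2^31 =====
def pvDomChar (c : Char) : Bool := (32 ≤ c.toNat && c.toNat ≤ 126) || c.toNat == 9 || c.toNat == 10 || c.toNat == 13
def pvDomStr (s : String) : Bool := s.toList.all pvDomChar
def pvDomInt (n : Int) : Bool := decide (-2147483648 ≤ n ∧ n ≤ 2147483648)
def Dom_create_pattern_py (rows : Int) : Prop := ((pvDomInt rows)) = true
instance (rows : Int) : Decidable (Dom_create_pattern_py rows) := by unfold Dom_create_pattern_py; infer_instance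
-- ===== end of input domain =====

-- B replaces A's four per-row step-2 range comprehensions (with modular start offsets) by one
-- fused grid loop with a checkerboard parity test; objective: simpler, same complexity.

-- ===== PORT A =====
-- state is the 4-tuple (a_gates, b_gates, c_gates, d_gates); each component is updated per row
def create_pattern_py (rows : Int) : List (List (List Int)) :=
  let st := (PySem.List.pyRange 0 rows 1).foldl
    (fun (st : List (List Int) × List (List Int) × List (List Int) × List (List Int)) row =>
      (if row < rows - 1 then
         st.1 ++ (PySem.List.pyRange (if PySem.Int.mod row 2 == 0 then rows * row else rows * row + 1)
                    ((row + 1) * rows) 2).map (fun x => [x, x + rows])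
       else st.1,
       if row < rows - 1 then
         st.2.1 ++ (PySem.List.pyRange (if PySem.Int.mod row 2 == 1 then rows * row else rows * row + 1)
                      ((row + 1) * rows) 2).map (fun x => [x, x + rows])
       else st.2.1,
       st.2.2.1 ++ (PySem.List.pyRange (if PySem.Int.mod row 2 == 0 then rows * row else rows * row + 1)
                      ((row + 1) * rows - 1) 2).map (fun x => [x, x + 1]),
       st.2.2.2 ++ (PySem.List.pyRange (if PySem.Int.mod row 2 == 1 then rows * row else rows * row + 1)
                      ((row + 1) * rows - 1) 2).map (fun x => [x, x + 1])))
    ([], [], [], [])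
  [st.1, st.2.1, st.2.2.1, st.2.2.2, st.2.2.1, st.2.2.2, st.1, st.2.1]

-- ===== PORT B =====
-- fused grid loop; x = r*rows + c inlined, 'even' = (r+c) % 2 == 0 checkerboard test
def create_pattern_py_alt (rows : Int) : List (List (List Int)) :=
  let st := (PySem.List.pyRange 0 rows 1).foldl
    (fun (st : List (List Int) × List (List Int) × List (List Int) × List (List Int)) r =>
      (PySem.List.pyRange 0 rows 1).foldl
        (fun (st : List (List Int) × List (List Int) × List (List Int) × List (List Int)) c =>
          (if decide (r < rows - 1) && (PySem.Int.mod (r + c) 2 == 0) then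
             st.1 ++ [[r * rows + c, r * rows + c + rows]] else st.1,
           if decide (r < rows - 1) && !(PySem.Int.mod (r + c) 2 == 0) then
             st.2.1 ++ [[r * rows + c, r * rows + c + rows]] else st.2.1,
           if decide (c < rows - 1) && (PySem.Int.mod (r + c) 2 == 0) then
             st.2.2.1 ++ [[r * rows + c, r * rows + c + 1]] else st.2.2.1,
           if decide (c < rows - 1) && !(PySem.Int.mod (r + c) 2 == 0) then
             st.2.2.2 ++ [[r * rows + c, r * rows + c + 1]] else st.2.2.2))
        st)
    ([], [], [], [])
  [st.1, st.2.1, st.2.2.1, st.2.2.2, st.2.2.1, st.2.2.2, st.1, st.2.1]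

-- ===== PRECONDITION & SPEC =====
def Spec_create_pattern_py (rows : Int) (out : List (List (List Int))) : Prop := out = create_pattern_py_alt rows
instance (rows : Int) (out : List (List (List Int))) : Decidable (Spec_create_pattern_py rows out) := by unfold Spec_create_pattern_py; infer_instance

-- ===== CLAIM (what is proved, stated in full; the proofs are below) =====
def Claim_equal_create_pattern_py : Prop := ∀ (rows : Int), Dom_create_pattern_py rows → Spec_create_pattern_py rows (create_pattern_py rows)

-- ===== LEMMAS AND PROOFS =====

-- per-row chunks of A's four lists
def gaA (rows row : Int) : List (List Int) :=
  if row < rows - 1 then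
    (PySem.List.pyRange (if PySem.Int.mod row 2 == 0 then rows * row else rows * row + 1)
      ((row + 1) * rows) 2).map (fun x => [x, x + rows])
  else []
def gbA (rows row : Int) : List (List Int) :=
  if row < rows - 1 then
    (PySem.List.pyRange (if PySem.Int.mod row 2 == 1 then rows * row else rows * row + 1)
      ((row + 1) * rows) 2).map (fun x => [x, x + rows])
  else []
def gcA (rows row : Int) : List (List Int) :=
  (PySem.List.pyRange (if PySem.Int.mod row 2 == 0 then rows * row else rows * row + 1)
    ((row + 1) * rows - 1) 2).map (fun x => [x, x + 1])
def gdA (rows row : Int) : List (List Int) :=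
  (PySem.List.pyRange (if PySem.Int.mod row 2 == 1 then rows * row else rows * row + 1)
    ((row + 1) * rows - 1) 2).map (fun x => [x, x + 1])

-- per-row chunks of B's four lists
def gaB (rows r : Int) : List (List Int) :=
  ((PySem.List.pyRange 0 rows 1).filter
    (fun c => decide (r < rows - 1) && (PySem.Int.mod (r + c) 2 == 0))).map
      (fun c => [r * rows + c, r * rows + c + rows])
def gbB (rows r : Int) : List (List Int) :=
  ((PySem.List.pyRange 0 rows 1).filter
    (fun c => decide (r < rows - 1) && !(PySem.Int.mod (r + c) 2 == 0))).map
      (fun c => [r * rows + c, r * rows + c + rows])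
def gcB (rows r : Int) : List (List Int) :=
  ((PySem.List.pyRange 0 rows 1).filter
    (fun c => decide (c < rows - 1) && (PySem.Int.mod (r + c) 2 == 0))).map
      (fun c => [r * rows + c, r * rows + c + 1])
def gdB (rows r : Int) : List (List Int) :=
  ((PySem.List.pyRange 0 rows 1).filter
    (fun c => decide (c < rows - 1) && !(PySem.Int.mod (r + c) 2 == 0))).map
      (fun c => [r * rows + c, r * rows + c + 1])

-- A's tuple loop accumulates the concatenation of the per-row chunks
lemma a_loop (rows : Int) (l : List Int) (a b c d : List (List Int)) :
    l.foldl
      (fun (st : List (List Int) × List (List Int) × List (List Int) × List (List Int)) row =>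
        (if row < rows - 1 then
           st.1 ++ (PySem.List.pyRange (if PySem.Int.mod row 2 == 0 then rows * row else rows * row + 1)
                      ((row + 1) * rows) 2).map (fun x => [x, x + rows])
         else st.1,
         if row < rows - 1 then
           st.2.1 ++ (PySem.List.pyRange (if PySem.Int.mod row 2 == 1 then rows * row else rows * row + 1)
                        ((row + 1) * rows) 2).map (fun x => [x, x + rows])
         else st.2.1,
         st.2.2.1 ++ (PySem.List.pyRange (if PySem.Int.mod row 2 == 0 then rows * row else rows * row + 1)
                        ((row + 1) * rows - 1) 2).map (fun x => [x, x + 1]),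
         st.2.2.2 ++ (PySem.List.pyRange (if PySem.Int.mod row 2 == 1 then rows * row else rows * row + 1)
                        ((row + 1) * rows - 1) 2).map (fun x => [x, x + 1])))
      (a, b, c, d)
    = (a ++ l.flatMap (gaA rows), b ++ l.flatMap (gbA rows),
       c ++ l.flatMap (gcA rows), d ++ l.flatMap (gdA rows)) := by
  induction l generalizing a b c d with
  | nil => simp
  | cons x xs ih =>
    simp only [List.foldl_cons, List.flatMap_cons, ih, gaA, gbA, gcA, gdA]
    split_ifs <;> simp

-- B's inner (column) loop appends the parity-filtered row chunk to each list
lemma b_inner (rows r : Int) (l : List Int) (a b c d : List (List Int)) :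
    l.foldl
      (fun (st : List (List Int) × List (List Int) × List (List Int) × List (List Int)) c =>
        (if decide (r < rows - 1) && (PySem.Int.mod (r + c) 2 == 0) then
           st.1 ++ [[r * rows + c, r * rows + c + rows]] else st.1,
         if decide (r < rows - 1) && !(PySem.Int.mod (r + c) 2 == 0) then
           st.2.1 ++ [[r * rows + c, r * rows + c + rows]] else st.2.1,
         if decide (c < rows - 1) && (PySem.Int.mod (r + c) 2 == 0) then
           st.2.2.1 ++ [[r * rows + c, r * rows + c + 1]] else st.2.2.1,
         if decide (c < rows - 1) && !(PySem.Int.mod (r + c) 2 == 0) then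
           st.2.2.2 ++ [[r * rows + c, r * rows + c + 1]] else st.2.2.2))
      (a, b, c, d)
    = (a ++ (l.filter (fun c => decide (r < rows - 1) && (PySem.Int.mod (r + c) 2 == 0))).map
          (fun c => [r * rows + c, r * rows + c + rows]),
       b ++ (l.filter (fun c => decide (r < rows - 1) && !(PySem.Int.mod (r + c) 2 == 0))).map
          (fun c => [r * rows + c, r * rows + c + rows]),
       c ++ (l.filter (fun c => decide (c < rows - 1) && (PySem.Int.mod (r + c) 2 == 0))).map
          (fun c => [r * rows + c, r * rows + c + 1]),
       d ++ (l.filter (fun c => decide (c < rows - 1) && !(PySem.Int.mod (r + c) 2 == 0))).map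
          (fun c => [r * rows + c, r * rows + c + 1])) := by
  induction l generalizing a b c d with
  | nil => simp
  | cons x xs ih =>
    simp only [List.foldl_cons, List.filter_cons, ih]
    split_ifs <;> simp [List.append_assoc]

-- B's outer (row) loop accumulates the concatenation of the per-row chunks
lemma b_loop (rows : Int) (l : List Int) (a b c d : List (List Int)) :
    l.foldl
      (fun (st : List (List Int) × List (List Int) × List (List Int) × List (List Int)) r =>
        (PySem.List.pyRange 0 rows 1).foldl
          (fun (st : List (List Int) × List (List Int) × List (List Int) × List (List Int)) c =>
            (if decide (r < rows - 1) && (PySem.Int.mod (r + c) 2 == 0) then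
               st.1 ++ [[r * rows + c, r * rows + c + rows]] else st.1,
             if decide (r < rows - 1) && !(PySem.Int.mod (r + c) 2 == 0) then
               st.2.1 ++ [[r * rows + c, r * rows + c + rows]] else st.2.1,
             if decide (c < rows - 1) && (PySem.Int.mod (r + c) 2 == 0) then
               st.2.2.1 ++ [[r * rows + c, r * rows + c + 1]] else st.2.2.1,
             if decide (c < rows - 1) && !(PySem.Int.mod (r + c) 2 == 0) then
               st.2.2.2 ++ [[r * rows + c, r * rows + c + 1]] else st.2.2.2))
          st)
      (a, b, c, d)
    = (a ++ l.flatMap (gaB rows), b ++ l.flatMap (gbB rows),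
       c ++ l.flatMap (gcB rows), d ++ l.flatMap (gdB rows)) := by
  induction l generalizing a b c d with
  | nil => simp
  | cons x xs ih =>
    simp only [List.foldl_cons, List.flatMap_cons, b_inner, ih, gaB, gbB, gcB, gdB,
      List.append_assoc]

-- a step-2 range equals the matching filtered offset window of range(0, R)
lemma range2_eq_filter_map (off s t R : Int) (p : Int → Bool)
    (hs : off ≤ s) (ht : t ≤ off + R)
    (hp : ∀ c, 0 ≤ c → c < R →
      (p c = true ↔ (s ≤ off + c ∧ off + c < t ∧ (2:Int) ∣ off + c - s))) :
    PySem.List.pyRange s t 2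
      = ((PySem.List.pyRange 0 R 1).filter p).map (fun c => off + c) := by
  have hpw1 : List.Pairwise (· < ·) (PySem.List.pyRange s t 2) := by
    rw [PySem.List.pyRange_of_pos s t (by norm_num)]
    exact List.pairwise_map.mpr (List.pairwise_lt_range.imp (by intro a b h; omega))
  have hpw2 : List.Pairwise (· < ·)
      (((PySem.List.pyRange 0 R 1).filter p).map (fun c => off + c)) := by
    exact List.pairwise_map.mpr
      (((PySem.List.pairwise_lt_pyRange_one 0 R).filter p).imp (by intro a b h; omega))
  have hmem : ∀ x, x ∈ PySem.List.pyRange s t 2 ↔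
      x ∈ ((PySem.List.pyRange 0 R 1).filter p).map (fun c => off + c) := by
    intro x
    rw [PySem.List.mem_pyRange_iff_of_pos (by norm_num)]
    simp only [List.mem_map, List.mem_filter, PySem.List.mem_pyRange_one]
    constructor
    · rintro ⟨h1, h2, h3⟩
      refine ⟨x - off, ⟨⟨by omega, by omega⟩,
        (hp (x - off) (by omega) (by omega)).mpr ⟨by omega, by omega, ?_⟩⟩, by omega⟩
      have : off + (x - off) - s = x - s := by ring
      rw [this]; exact h3
    · rintro ⟨c, ⟨⟨hc0, hcR⟩, hpc⟩, rfl⟩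
      have := (hp c hc0 hcR).mp hpc
      exact ⟨this.1, this.2.1, this.2.2⟩
  have hperm := (List.perm_ext_iff_of_nodup
      (hpw1.imp fun h => ne_of_lt h) (hpw2.imp fun h => ne_of_lt h)).mpr hmem
  exact hperm.eq_of_pairwise (fun a b _ _ h1 h2 => absurd h2 (not_lt.mpr h1.le)) hpw1 hpw2

-- per-row equality of the four chunks (for 0 ≤ r)
lemma chunk_a (rows r : Int) : gaA rows r = gaB rows r := by
  unfold gaA gaB
  by_cases h : r < rows - 1
  · simp only [if_pos h, decide_eq_true h, Bool.true_and, add_mul, one_mul,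
      show r * rows = rows * r from mul_comm r rows]
    rw [range2_eq_filter_map (rows * r) _ (rows * r + rows) rows
        (fun c => (PySem.Int.mod (r + c) 2 == 0))
        (by split_ifs <;> omega) (by omega)
        (by intro c h0 hR
            simp only [beq_iff_eq, PySem.Int.mod_eq_emod_of_pos (show (0:Int) < 2 by norm_num)]
            split_ifs with hpar <;>
              simp only [beq_iff_eq, PySem.Int.mod_eq_emod_of_pos (show (0:Int) < 2 by norm_num)] at hpar <;>
              omega)]
    rw [List.map_map]; rfl
  · simp only [if_neg h, decide_eq_false h, Bool.false_and, List.filter_false, List.map_nil]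

lemma chunk_b (rows r : Int) : gbA rows r = gbB rows r := by
  unfold gbA gbB
  by_cases h : r < rows - 1
  · simp only [if_pos h, decide_eq_true h, Bool.true_and, add_mul, one_mul,
      show r * rows = rows * r from mul_comm r rows]
    rw [range2_eq_filter_map (rows * r) _ (rows * r + rows) rows
        (fun c => !(PySem.Int.mod (r + c) 2 == 0))
        (by split_ifs <;> omega) (by omega)
        (by intro c h0 hR
            simp only [Bool.not_eq_eq_eq_not, Bool.not_true, beq_eq_false_iff_ne, ne_eq,
              PySem.Int.mod_eq_emod_of_pos (show (0:Int) < 2 by norm_num)]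
            split_ifs with hpar <;>
              simp only [beq_iff_eq, PySem.Int.mod_eq_emod_of_pos (show (0:Int) < 2 by norm_num)] at hpar <;>
              omega)]
    rw [List.map_map]; rfl
  · simp only [if_neg h, decide_eq_false h, Bool.false_and, List.filter_false, List.map_nil]

lemma chunk_c (rows r : Int) : gcA rows r = gcB rows r := by
  unfold gcA gcB
  simp only [add_mul, one_mul, show r * rows = rows * r from mul_comm r rows]
  rw [range2_eq_filter_map (rows * r) _ (rows * r + rows - 1) rows
      (fun c => decide (c < rows - 1) && (PySem.Int.mod (r + c) 2 == 0))
      (by split_ifs <;> omega) (by omega)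
      (by intro c h0 hR
          simp only [Bool.and_eq_true, decide_eq_true_eq, beq_iff_eq,
            PySem.Int.mod_eq_emod_of_pos (show (0:Int) < 2 by norm_num)]
          split_ifs with hpar <;>
            simp only [beq_iff_eq, PySem.Int.mod_eq_emod_of_pos (show (0:Int) < 2 by norm_num)] at hpar <;>
            omega)]
  rw [List.map_map]; rfl

lemma chunk_d (rows r : Int) : gdA rows r = gdB rows r := by
  unfold gdA gdB
  simp only [add_mul, one_mul, show r * rows = rows * r from mul_comm r rows]
  rw [range2_eq_filter_map (rows * r) _ (rows * r + rows - 1) rows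
      (fun c => decide (c < rows - 1) && !(PySem.Int.mod (r + c) 2 == 0))
      (by split_ifs <;> omega) (by omega)
      (by intro c h0 hR
          simp only [Bool.and_eq_true, decide_eq_true_eq, Bool.not_eq_eq_eq_not, Bool.not_true,
            beq_eq_false_iff_ne, ne_eq,
            PySem.Int.mod_eq_emod_of_pos (show (0:Int) < 2 by norm_num)]
          split_ifs with hpar <;>
            simp only [beq_iff_eq, PySem.Int.mod_eq_emod_of_pos (show (0:Int) < 2 by norm_num)] at hpar <;>
            omega)]
  rw [List.map_map]; rfl

lemma flatMap_congr_mem {α β : Type} (l : List α) (f g : α → List β)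
    (h : ∀ x ∈ l, f x = g x) : l.flatMap f = l.flatMap g := by
  induction l with
  | nil => rfl
  | cons x xs ih =>
    simp only [List.flatMap_cons, h x (List.mem_cons_self),
      ih (fun y hy => h y (List.mem_cons_of_mem x hy))]

-- ===== VERDICT (by name: the statement is the Claim_ definition above) =====
theorem create_pattern_py_spec : Claim_equal_create_pattern_py := by
  intro rows _
  show create_pattern_py rows = create_pattern_py_alt rows
  simp only [create_pattern_py, create_pattern_py_alt]
  rw [a_loop, b_loop]
  have hA : ∀ (g1 g2 : Int → List (List Int)),
      (∀ r, g1 r = g2 r) →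
      (PySem.List.pyRange 0 rows 1).flatMap g1 = (PySem.List.pyRange 0 rows 1).flatMap g2 := by
    intro g1 g2 hg
    exact flatMap_congr_mem _ _ _ (fun r _ => hg r)
  simp only [List.nil_append]
  rw [hA (gaA rows) (gaB rows) (chunk_a rows), hA (gbA rows) (gbB rows) (chunk_b rows),
      hA (gcA rows) (gcB rows) (chunk_c rows), hA (gdA rows) (gdB rows) (chunk_d rows)]
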